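-- pv_equiv track=rewrite | github.com/akshayayadav/protein-domain-evolution-project | scripts/calculate_species_level_domain_versatility_matrix.py | get_species_domvrstlty_dict
-- ===== SOURCE A (Python) =====
-- def get_species_domvrstlty_dict(species_seqid_domarr_dict):
-- 	species_domvrstlty_dict = {}
-- 	for species in species_seqid_domarr_dict:
-- 		species_domvrstlty_dict[species]={}
-- 		for seq in species_seqid_domarr_dict[species]:
-- 			dom_arr = species_seqid_domarr_dict[species][seq]
-- 			dom1_dom2_dict = get_domain_adjacency_dict(dom_arr)
--
-- 			for dom1 in dom1_dom2_dict:
-- 				if not (dom1 in species_domvrstlty_dict[species]):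
-- 					species_domvrstlty_dict[species][dom1]={}
-- 				for dom2 in dom1_dom2_dict[dom1]:
-- 					species_domvrstlty_dict[species][dom1][dom2]=1
--
-- 	return(species_domvrstlty_dict)
--
-- def get_domain_adjacency_dict(dom_arr):
-- 	dom1_dom2_dict = {}
-- 	if(len(dom_arr)<2):
-- 		return(dom1_dom2_dict)
-- 	for i in range(0, len(dom_arr)):
-- 		if not (dom_arr[i] in dom1_dom2_dict):
-- 			dom1_dom2_dict[dom_arr[i]]={}
--
-- 		if(i==0):
-- 			#if(dom_arr[i] != dom_arr[i+1]):
-- 			dom1_dom2_dict[dom_arr[i]][dom_arr[i+1]]=1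
-- 		elif(i==len(dom_arr)-1):
-- 			#if(dom_arr[i] != dom_arr[i-1]):
-- 			dom1_dom2_dict[dom_arr[i]][dom_arr[i-1]]=1
-- 		else:
-- 			#if(dom_arr[i] != dom_arr[i+1]):
-- 			dom1_dom2_dict[dom_arr[i]][dom_arr[i+1]]=1
-- 			#if(dom_arr[i] != dom_arr[i-1]):
-- 			dom1_dom2_dict[dom_arr[i]][dom_arr[i-1]]=1
--
-- 	return(dom1_dom2_dict)
-- ===== SOURCE B (Python) =====
-- def _edges(seqid_domarr_dict):
-- 	for dom_arr in seqid_domarr_dict.values():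
-- 		it = iter(dom_arr)
-- 		prev = None
-- 		try:
-- 			cur = next(it)
-- 		except StopIteration:
-- 			continue
-- 		for nxt in it:
-- 			yield cur, nxt
-- 			if prev is not None:
-- 				yield cur, prev
-- 			prev, cur = cur, nxt
-- 		if prev is not None:
-- 			yield cur, prev
--
-- def get_species_domvrstlty_dict(species_seqid_domarr_dict):
-- 	species_domvrstlty_dict = {}
-- 	for species, seqid_domarr_dict in species_seqid_domarr_dict.items():
-- 		adjacency = {}
-- 		for dom1, dom2 in _edges(seqid_domarr_dict):
-- 			adjacency.setdefault(dom1, {})[dom2] = 1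
-- 		species_domvrstlty_dict[species] = adjacency
-- 	return species_domvrstlty_dict
-- ===== Notes on version B (the rewrite author's own statement) =====
-- stated objective: simpler
-- what changed: B is staged generate-then-consume: a prev-carrying pairwise walk (no indexing, no per-sequence helper dict) yields one flat bidirectional edge stream per species, and a single fold over that stream builds the dict, replacing A's index loop that builds a per-sequence adjacency dict and then merges it with a nested dict-of-dicts scan.
import Mathlib
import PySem

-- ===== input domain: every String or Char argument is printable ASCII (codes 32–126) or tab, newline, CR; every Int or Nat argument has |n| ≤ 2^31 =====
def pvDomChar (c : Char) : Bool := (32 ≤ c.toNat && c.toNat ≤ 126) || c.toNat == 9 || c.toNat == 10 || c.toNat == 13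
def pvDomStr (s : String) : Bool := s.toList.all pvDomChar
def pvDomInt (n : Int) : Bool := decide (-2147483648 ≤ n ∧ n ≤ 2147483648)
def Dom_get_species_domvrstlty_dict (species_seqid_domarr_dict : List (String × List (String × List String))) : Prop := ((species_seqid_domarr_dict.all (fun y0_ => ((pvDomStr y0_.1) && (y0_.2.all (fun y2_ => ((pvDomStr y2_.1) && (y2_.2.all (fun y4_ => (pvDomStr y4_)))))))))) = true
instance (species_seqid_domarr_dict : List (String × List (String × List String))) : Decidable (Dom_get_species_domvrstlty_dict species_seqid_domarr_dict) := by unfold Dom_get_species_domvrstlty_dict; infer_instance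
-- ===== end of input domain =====

-- B replaces A's index loop + per-sequence adjacency dict + nested merge by a staged design:
-- a prev-carrying walk emits one flat bidirectional edge stream, and a single fold over that
-- stream builds the per-species dict (objective: simpler). Return-value equivalence only;
-- neither version mutates its argument.

abbrev InnerD : Type := PySem.Dict String Int
abbrev SpD : Type := PySem.Dict String InnerD

-- ===== PORT A =====
-- loop body of get_domain_adjacency_dict's `for i in range(0, len(dom_arr))`
def adjacencyStep (dom_arr : List String) (d : SpD) (i : Nat) : SpD :=
  let a := dom_arr.getD i ""
  let d' := if d.contains a then d else d.insert a PySem.Dict.empty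
  if i = 0 then
    d'.modify a PySem.Dict.empty (fun m => m.insert (dom_arr.getD (i + 1) "") 1)
  else if i = dom_arr.length - 1 then
    d'.modify a PySem.Dict.empty (fun m => m.insert (dom_arr.getD (i - 1) "") 1)
  else
    (d'.modify a PySem.Dict.empty (fun m => m.insert (dom_arr.getD (i + 1) "") 1)).modify a
      PySem.Dict.empty (fun m => m.insert (dom_arr.getD (i - 1) "") 1)

-- indices are Nat: the Python loop indexes are 0 ≤ i < len and all accesses are in range,
-- so List.getD is exact here
def get_domain_adjacency_dict (dom_arr : List String) : SpD :=
  if dom_arr.length < 2 then PySem.Dict.empty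
  else (List.range dom_arr.length).foldl (adjacencyStep dom_arr) PySem.Dict.empty

-- body of `for seq in species_seqid_domarr_dict[species]` (the per-species dict is mutated in
-- place in Python; it is threaded as `sp` here)
def mergeSeqStep (sp : SpD) (seq : String × List String) : SpD :=
  (get_domain_adjacency_dict seq.2).items.foldl
    (fun sp pr =>
      pr.2.items.foldl (fun sp q => sp.modify pr.1 PySem.Dict.empty (fun m => m.insert q.1 1))
        (if sp.contains pr.1 then sp else sp.insert pr.1 PySem.Dict.empty))
    sp

def get_species_domvrstlty_dict (species_seqid_domarr_dict : List (String × List (String × List String))) : List (String × List (String × List (String × Int))) :=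
  (species_seqid_domarr_dict.foldl
      (fun out sp_seqs => out.insert sp_seqs.1 (sp_seqs.2.foldl mergeSeqStep PySem.Dict.empty))
      PySem.Dict.empty).items.map
    (fun p => (p.1, p.2.items.map (fun q => (q.1, q.2.items))))

-- ===== PORT B =====
-- `_edges`' inner walk: carries the previous element, yields (cur,nxt) then (cur,prev),
-- and a final (cur,prev) when the iterator is exhausted (no yield when prev is None)
def edgeWalk (prev : Option String) (cur : String) : List String → List (String × String)
  | [] => match prev with | some p => [(cur, p)] | none => []
  | nxt :: rest =>
    ((cur, nxt) :: (match prev with | some p => [(cur, p)] | none => [])) ++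
      edgeWalk (some cur) nxt rest

-- one sequence's contribution to the edge stream (empty iterator → no edges)
def edgesOf : List String → List (String × String)
  | [] => []
  | c :: rest => edgeWalk none c rest

-- body of `for dom1, dom2 in _edges(...)`: setdefault then write 1
def bStep (sp : SpD) (e : String × String) : SpD :=
  (sp.setdefault e.1 PySem.Dict.empty).modify e.1 PySem.Dict.empty (fun m => m.insert e.2 1)

def get_species_domvrstlty_dict_alt (species_seqid_domarr_dict : List (String × List (String × List String))) : List (String × List (String × List (String × Int))) :=
  (species_seqid_domarr_dict.foldl
      (fun out sp_seqs =>
        out.insert sp_seqs.1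
          ((sp_seqs.2.flatMap (fun s => edgesOf s.2)).foldl bStep PySem.Dict.empty))
      PySem.Dict.empty).items.map
    (fun p => (p.1, p.2.items.map (fun q => (q.1, q.2.items))))

-- ===== PRECONDITION & SPEC =====
def Spec_get_species_domvrstlty_dict (species_seqid_domarr_dict : List (String × List (String × List String))) (out : List (String × List (String × List (String × Int)))) : Prop := out = get_species_domvrstlty_dict_alt species_seqid_domarr_dict
instance (species_seqid_domarr_dict : List (String × List (String × List String))) (out : List (String × List (String × List (String × Int)))) : Decidable (Spec_get_species_domvrstlty_dict species_seqid_domarr_dict out) := by unfold Spec_get_species_domvrstlty_dict; infer_instance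

-- ===== CLAIM (what is proved, stated in full; the proofs are below) =====
def Claim_equal_get_species_domvrstlty_dict : Prop := ∀ (species_seqid_domarr_dict : List (String × List (String × List String))), Dom_get_species_domvrstlty_dict species_seqid_domarr_dict → Spec_get_species_domvrstlty_dict species_seqid_domarr_dict (get_species_domvrstlty_dict species_seqid_domarr_dict)

-- ===== LEMMAS AND PROOFS =====

-- Normal form: applying one edge-write `sp[k][v] = 1` (creating sp[k] if needed)
def ap1 (sp : SpD) (o : String × String) : SpD :=
  sp.insert o.1 ((sp.getD o.1 PySem.Dict.empty).insert o.2 1)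

def apN (sp : SpD) (ops : List (String × String)) : SpD := ops.foldl ap1 sp

def gops (pr : String × InnerD) : List (String × String) := pr.2.items.map (fun q => (pr.1, q.1))

def flatL (L : List (String × InnerD)) : List (String × String) := L.flatMap gops

def opsAt (arr : List String) (i : Nat) : List (String × String) :=
  (if i + 1 < arr.length then [(arr.getD i "", arr.getD (i + 1) "")] else []) ++
  (if 0 < i then [(arr.getD i "", arr.getD (i - 1) "")] else [])

def opsOf (arr : List String) : List (String × String) := (List.range arr.length).flatMap (opsAt arr)

-- like opsAt, but the backward edge is always present, with `p` the element before arr[0]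
def prevTerm (p : String) (arr : List String) (i : Nat) : List (String × String) :=
  (if i + 1 < arr.length then [(arr.getD i "", arr.getD (i + 1) "")] else []) ++
  [(arr.getD i "", if i = 0 then p else arr.getD (i - 1) "")]

def prevOps (p : String) (arr : List String) : List (String × String) :=
  (List.range arr.length).flatMap (prevTerm p arr)

def GoodI (m : InnerD) : Prop := m.keys.Nodup ∧ ∀ q ∈ m.items, q.2 = (1 : Int)
def Good (sp : SpD) : Prop := sp.keys.Nodup ∧ ∀ p ∈ sp.items, GoodI p.2
def GoodA (sp : SpD) : Prop := Good sp ∧ ∀ p ∈ sp.items, p.2.items ≠ []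
def has1 (sp : SpD) (k v : String) : Prop :=
  sp.contains k = true ∧ (sp.getD k PySem.Dict.empty).get? v = some 1

-- list-level image of `ap1` on items
def listIns (L : List (String × InnerD)) (k v : String) : List (String × InnerD) :=
  match L with
  | [] => [(k, PySem.Dict.empty.insert v 1)]
  | (k2, i2) :: rest => if k2 == k then (k, i2.insert v 1) :: rest else (k2, i2) :: listIns rest k v

theorem GoodI_empty : GoodI PySem.Dict.empty := by
  constructor <;> simp [PySem.Dict.empty, PySem.Dict.keys]

theorem Good_empty : Good PySem.Dict.empty := by
  constructor <;> simp [PySem.Dict.empty, PySem.Dict.keys]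

theorem GoodA_empty : GoodA PySem.Dict.empty := by
  refine ⟨Good_empty, ?_⟩; simp [PySem.Dict.empty]

theorem modify_eq_ap1 (d : SpD) (k v : String) :
    d.modify k PySem.Dict.empty (fun m => m.insert v 1) = ap1 d (k, v) := rfl

theorem ap1_ensure (sp : SpD) (k v : String) :
    ap1 (if sp.contains k then sp else sp.insert k PySem.Dict.empty) (k, v) = ap1 sp (k, v) := by
  by_cases h : sp.contains k = true
  · simp [h]
  · rw [if_neg h]
    show PySem.Dict.insert _ _ _ = _
    rw [PySem.Dict.getD_insert_self, PySem.Dict.insert_insert_self]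
    show _ = PySem.Dict.insert sp k ((sp.getD k PySem.Dict.empty).insert v 1)
    rw [PySem.Dict.getD_of_not_contains sp _ (eq_false_of_ne_true h)]

theorem setdefault_eq_ensure (sp : SpD) (k : String) :
    sp.setdefault k PySem.Dict.empty = if sp.contains k then sp else sp.insert k PySem.Dict.empty := by
  by_cases h : sp.contains k = true
  · simp [PySem.Dict.setdefault, h]
  · simp [PySem.Dict.setdefault, PySem.Dict.insert, eq_false_of_ne_true h]

theorem contains_ap1 (sp : SpD) (o : String × String) (k : String) :
    (ap1 sp o).contains k = (k == o.1 || sp.contains k) := by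
  simp [ap1, PySem.Dict.contains_insert]

theorem contains_apN_mono (ops : List (String × String)) (sp : SpD) (k : String)
    (h : sp.contains k = true) : (apN sp ops).contains k = true := by
  induction ops generalizing sp with
  | nil => exact h
  | cons o rest ih => exact ih _ (by simp [contains_ap1, h])

theorem contains_apN_of_mem (ops : List (String × String)) (sp : SpD) (k v : String)
    (h : (k, v) ∈ ops) : (apN sp ops).contains k = true := by
  induction ops generalizing sp with
  | nil => cases h
  | cons o rest ih =>
    rcases List.mem_cons.mp h with h | h
    · exact contains_apN_mono rest _ _ (by simp [contains_ap1, ← h])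
    · exact ih _ h

theorem GoodI_getD (sp : SpD) (k : String) (h : Good sp) :
    GoodI (sp.getD k PySem.Dict.empty) := by
  by_cases hc : sp.contains k = true
  · rw [PySem.Dict.contains_eq_isSome_get?] at hc
    rcases Option.isSome_iff_exists.mp hc with ⟨w, hw⟩
    rw [PySem.Dict.getD_of_get?_eq_some _ _ hw]
    exact (h.2 (k, w) (PySem.Dict.mem_items_of_get?_eq_some _ hw)).elim (fun _ h2 => h.2 _ (PySem.Dict.mem_items_of_get?_eq_some _ hw))
  · rw [PySem.Dict.getD_of_not_contains sp _ (by simpa using hc)]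
    exact GoodI_empty

theorem GoodI_ins (m : InnerD) (v : String) (h : GoodI m) : GoodI (m.insert v 1) := by
  refine ⟨PySem.Dict.nodup_keys_insert _ _ _ h.1, fun q hq => ?_⟩
  rcases (PySem.Dict.mem_items_insert _ _ _ _).mp hq with h1 | h1
  · rw [h1]
  · exact h.2 q h1.1

theorem Good_ap1 (sp : SpD) (o : String × String) (h : Good sp) : Good (ap1 sp o) := by
  refine ⟨PySem.Dict.nodup_keys_insert _ _ _ h.1, fun p hp => ?_⟩
  rcases (PySem.Dict.mem_items_insert _ _ _ _).mp hp with h1 | h1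
  · rw [h1]; exact GoodI_ins _ _ (GoodI_getD sp o.1 h)
  · exact h.2 p h1.1

theorem Good_apN (ops : List (String × String)) (sp : SpD) (h : Good sp) : Good (apN sp ops) := by
  induction ops generalizing sp with
  | nil => exact h
  | cons o rest ih => exact ih _ (Good_ap1 sp o h)

theorem items_ins_ne_nil (m : InnerD) (v : String) : (m.insert v 1).items ≠ [] := by
  by_cases h : m.contains v = true
  · rw [PySem.Dict.items_insert_of_contains _ _ h]
    simp only [ne_eq, List.map_eq_nil_iff]
    intro he
    have h2 := h
    simp only [PySem.Dict.contains, he, List.any_nil] at h2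
    exact absurd h2 (by simp)
  · rw [PySem.Dict.items_insert_of_not_contains _ _ (eq_false_of_ne_true h)]
    simp

theorem GoodA_ap1 (sp : SpD) (o : String × String) (h : GoodA sp) : GoodA (ap1 sp o) := by
  refine ⟨Good_ap1 sp o h.1, fun p hp => ?_⟩
  rcases (PySem.Dict.mem_items_insert _ _ _ _).mp hp with h1 | h1
  · rw [h1]; exact items_ins_ne_nil _ _
  · exact h.2 p h1.1

theorem GoodA_apN (ops : List (String × String)) (sp : SpD) (h : GoodA sp) : GoodA (apN sp ops) := by
  induction ops generalizing sp with
  | nil => exact h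
  | cons o rest ih => exact ih _ (GoodA_ap1 sp o h)

theorem insert_get?_self_eq {ν : Type} (d : PySem.Dict String ν) (k : String) (w : ν)
    (h : d.get? k = some w) (hnd : d.keys.Nodup) : d.insert k w = d := by
  have hc : d.contains k = true := by rw [PySem.Dict.contains_eq_isSome_get?, h]; rfl
  apply PySem.Dict.ext
  rw [PySem.Dict.items_insert_of_contains _ _ hc]
  conv_rhs => rw [← List.map_id d.items]
  apply List.map_congr_left
  intro p hp
  by_cases hb : (p.1 == k) = true
  · have hk : p.1 = k := by exact eq_of_beq hb
    have hg : d.get? p.1 = some p.2 := PySem.Dict.get?_of_mem_items d hp hnd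
    rw [hk, h] at hg
    simp only [hb, if_true, id]
    rw [Option.some_inj.mp hg, ← hk]
  · simp [hb]

theorem has1_ap1_self (sp : SpD) (k v : String) : has1 (ap1 sp (k, v)) k v := by
  refine ⟨by simp [contains_ap1], ?_⟩
  show ((sp.insert k _).getD k PySem.Dict.empty).get? v = some 1
  rw [PySem.Dict.getD_insert_self, PySem.Dict.get?_insert_self]

theorem has1_ap1_mono (sp : SpD) (o : String × String) (k v : String) (h : has1 sp k v) :
    has1 (ap1 sp o) k v := by
  refine ⟨by simp [contains_ap1, h.1], ?_⟩
  show ((sp.insert o.1 _).getD k PySem.Dict.empty).get? v = some 1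
  by_cases hk : k = o.1
  · subst hk
    rw [PySem.Dict.getD_insert_self]
    by_cases hv : v = o.2
    · subst hv; rw [PySem.Dict.get?_insert_self]
    · rw [PySem.Dict.get?_insert_of_ne _ _ hv]
      have := h.2
      rw [PySem.Dict.getD_eq_get?_getD] at this ⊢
      exact this
  · rw [PySem.Dict.getD_insert_of_ne _ _ _ hk]; exact h.2

theorem has1_apN_mono (ops : List (String × String)) (sp : SpD) (k v : String)
    (h : has1 sp k v) : has1 (apN sp ops) k v := by
  induction ops generalizing sp with
  | nil => exact h
  | cons o rest ih => exact ih _ (has1_ap1_mono sp o k v h)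

theorem has1_apN_of_mem (ops : List (String × String)) (sp : SpD) (k v : String)
    (h : (k, v) ∈ ops) : has1 (apN sp ops) k v := by
  induction ops generalizing sp with
  | nil => cases h
  | cons o rest ih =>
    rcases List.mem_cons.mp h with h | h
    · exact has1_apN_mono rest _ _ _ (h ▸ has1_ap1_self sp k v)
    · exact ih _ h

theorem ap1_absorb (sp : SpD) (k v : String) (hG : Good sp) (h : has1 sp k v) :
    ap1 sp (k, v) = sp := by
  rcases h with ⟨hc, hv⟩
  show sp.insert k ((sp.getD k PySem.Dict.empty).insert v 1) = sp
  have hGI := GoodI_getD sp k hG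
  rw [insert_get?_self_eq _ _ _ hv hGI.1]
  rw [PySem.Dict.contains_eq_isSome_get?] at hc
  rcases Option.isSome_iff_exists.mp hc with ⟨w, hw⟩
  rw [PySem.Dict.getD_of_get?_eq_some _ _ hw]
  exact insert_get?_self_eq _ _ _ hw hG.1

theorem ins_comm {ν : Type} (d : PySem.Dict String ν) (k k' : String) (w w' : ν)
    (hne : k ≠ k') (hk : d.contains k = true) :
    (d.insert k w).insert k' w' = (d.insert k' w').insert k w := by
  have hbne : (k == k') = false := beq_eq_false_iff_ne.mpr hne
  have hbne' : (k' == k) = false := beq_eq_false_iff_ne.mpr (Ne.symm hne)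
  apply PySem.Dict.ext
  by_cases h' : d.contains k' = true
  · have c1 : (d.insert k w).contains k' = true := by
      rw [PySem.Dict.contains_insert, h']; simp
    have c2 : (d.insert k' w').contains k = true := by
      rw [PySem.Dict.contains_insert, hk]; simp
    rw [PySem.Dict.items_insert_of_contains _ _ c1, PySem.Dict.items_insert_of_contains _ _ hk,
      PySem.Dict.items_insert_of_contains _ _ c2, PySem.Dict.items_insert_of_contains _ _ h',
      List.map_map, List.map_map]
    apply List.map_congr_left
    intro p _
    by_cases h1 : p.1 = k
    · have h2 : p.1 ≠ k' := by rw [h1]; exact hne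
      simp [Function.comp, h1, hbne]
    · by_cases h2 : p.1 = k'
      · simp [Function.comp, h2, hbne']
      · simp [Function.comp, h1, h2]
  · have c1 : (d.insert k w).contains k' = false := by
      rw [PySem.Dict.contains_insert, hbne', eq_false_of_ne_true h']; rfl
    have c2 : (d.insert k' w').contains k = true := by
      rw [PySem.Dict.contains_insert, hk]; simp
    rw [PySem.Dict.items_insert_of_not_contains _ _ c1, PySem.Dict.items_insert_of_contains _ _ hk,
      PySem.Dict.items_insert_of_contains _ _ c2,
      PySem.Dict.items_insert_of_not_contains _ _ (eq_false_of_ne_true h'), List.map_append]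
    simp [Ne.symm hne]

theorem ap1_comm (sp : SpD) (k v k' v' : String) (hne : k' ≠ k) (hk : sp.contains k = true) :
    ap1 (ap1 sp (k, v)) (k', v') = ap1 (ap1 sp (k', v')) (k, v) := by
  show (sp.insert k _).insert k' (((sp.insert k _).getD k' PySem.Dict.empty).insert v' 1)
      = (sp.insert k' _).insert k (((sp.insert k' _).getD k PySem.Dict.empty).insert v 1)
  rw [PySem.Dict.getD_insert_of_ne _ _ _ hne, PySem.Dict.getD_insert_of_ne _ _ _ (Ne.symm hne)]
  exact ins_comm sp k k' _ _ (Ne.symm hne) hk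

theorem apN_comm (l : List (String × String)) (sp : SpD) (k v : String)
    (hk : sp.contains k = true) (hl : ∀ o ∈ l, o.1 ≠ k) :
    apN (ap1 sp (k, v)) l = ap1 (apN sp l) (k, v) := by
  induction l generalizing sp with
  | nil => rfl
  | cons o rest ih =>
    show apN (ap1 (ap1 sp (k, v)) o) rest = ap1 (apN (ap1 sp o) rest) (k, v)
    rw [show ap1 (ap1 sp (k, v)) o = ap1 (ap1 sp o) (k, v) from
      (ap1_comm sp k v o.1 o.2 (hl o (List.mem_cons_self)) hk)]
    exact ih (ap1 sp o) (by simp [contains_ap1, hk]) (fun o' ho' => hl o' (List.mem_cons_of_mem _ ho'))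

theorem items_ap1 (L : List (String × InnerD)) (k v : String)
    (h : (L.map Prod.fst).Nodup) :
    (ap1 (PySem.Dict.mk L) (k, v)).items = listIns L k v := by
  induction L with
  | nil =>
    simp [ap1, listIns, PySem.Dict.insert, PySem.Dict.contains, PySem.Dict.getD,
      PySem.Dict.get?, PySem.Dict.empty]
  | cons p rest ih =>
    obtain ⟨k2, i2⟩ := p
    simp only [List.map_cons, List.nodup_cons] at h
    by_cases hb : (k2 == k) = true
    · have hk2 : k2 = k := eq_of_beq hb
      subst hk2
      have hcont : (PySem.Dict.mk ((k2, i2) :: rest)).contains k2 = true := by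
        simp [PySem.Dict.contains]
      have hW : (PySem.Dict.mk ((k2, i2) :: rest)).getD k2 PySem.Dict.empty = i2 := by
        simp [PySem.Dict.getD, PySem.Dict.get?]
      show ((PySem.Dict.mk ((k2, i2) :: rest)).insert k2
          (((PySem.Dict.mk ((k2, i2) :: rest)).getD k2 PySem.Dict.empty).insert v 1)).items
          = listIns ((k2, i2) :: rest) k2 v
      rw [hW, PySem.Dict.items_insert_of_contains _ _ hcont, List.map_cons]
      simp only [listIns, hb, if_true]
      congr 1
      conv_rhs => rw [← List.map_id rest]
      apply List.map_congr_left
      intro q hq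
      have hqne : (q.1 == k2) = false :=
        beq_eq_false_iff_ne.mpr (fun hc => h.1 (hc ▸ List.mem_map_of_mem hq))
      simp [hqne]
    · have hb' : (k2 == k) = false := eq_false_of_ne_true hb
      have hW : (PySem.Dict.mk ((k2, i2) :: rest)).getD k PySem.Dict.empty
          = (PySem.Dict.mk rest).getD k PySem.Dict.empty := by
        simp only [PySem.Dict.getD, PySem.Dict.get?]
        rw [List.find?_cons_of_neg (by simp [hb'])]
      have hcont : (PySem.Dict.mk ((k2, i2) :: rest)).contains k = (PySem.Dict.mk rest).contains k := by
        simp [PySem.Dict.contains, hb']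
      show ((PySem.Dict.mk ((k2, i2) :: rest)).insert k
          (((PySem.Dict.mk ((k2, i2) :: rest)).getD k PySem.Dict.empty).insert v 1)).items
          = listIns ((k2, i2) :: rest) k v
      rw [hW]
      have hlist : listIns ((k2, i2) :: rest) k v = (k2, i2) :: listIns rest k v := by
        simp [listIns, hb']
      rw [hlist, ← ih h.2]
      by_cases hc : (PySem.Dict.mk rest).contains k = true
      · rw [PySem.Dict.items_insert_of_contains _ _ (by rw [hcont]; exact hc), List.map_cons]
        show _ :: _ = _ :: ((PySem.Dict.mk rest).insert k _).items
        rw [PySem.Dict.items_insert_of_contains _ _ hc]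
        simp [hb']
      · have hc' : (PySem.Dict.mk rest).contains k = false := eq_false_of_ne_true hc
        rw [PySem.Dict.items_insert_of_not_contains _ _ (by rw [hcont]; exact hc')]
        show _ = _ :: ((PySem.Dict.mk rest).insert k _).items
        rw [PySem.Dict.items_insert_of_not_contains _ _ hc']
        rfl

theorem mem_flatL (L : List (String × InnerD)) (k v : String)
    (pr : String × InnerD) (hpr : pr ∈ L) (hk : pr.1 = k) (hmem : ∃ x, (v, x) ∈ pr.2.items) :
    (k, v) ∈ flatL L := by
  rcases hmem with ⟨x, hx⟩
  unfold flatL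
  rw [List.mem_flatMap]
  refine ⟨pr, hpr, ?_⟩
  unfold gops
  rw [List.mem_map]
  exact ⟨(v, x), hx, by rw [hk]⟩

theorem apN_append (sp : SpD) (l l' : List (String × String)) :
    apN sp (l ++ l') = apN (apN sp l) l' := List.foldl_append

theorem flatL_cons (pr : String × InnerD) (L : List (String × InnerD)) :
    flatL (pr :: L) = gops pr ++ flatL L := by simp [flatL]

theorem insert_one_of_contains (m : InnerD) (v : String) (hG : GoodI m)
    (hc : m.contains v = true) : m.insert v 1 = m := by
  rw [PySem.Dict.contains_eq_isSome_get?] at hc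
  rcases Option.isSome_iff_exists.mp hc with ⟨w, hw⟩
  have hw1 : w = 1 := hG.2 (v, w) (PySem.Dict.mem_items_of_get?_eq_some _ hw)
  rw [← hw1]
  exact insert_get?_self_eq m v w hw hG.1

theorem flatL_fst (L : List (String × InnerD)) (o : String × String) (ho : o ∈ flatL L) :
    o.1 ∈ L.map Prod.fst := by
  unfold flatL at ho
  rcases List.mem_flatMap.mp ho with ⟨pr, hpr, hg⟩
  unfold gops at hg
  rcases List.mem_map.mp hg with ⟨q, _, hq⟩
  rw [← hq]
  exact List.mem_map_of_mem hpr

theorem apN_listIns (L : List (String × InnerD)) (k v : String) (sp : SpD)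
    (hsp : Good sp) (hN : (L.map Prod.fst).Nodup)
    (hG : ∀ p ∈ L, GoodI p.2 ∧ p.2.items ≠ []) :
    apN sp (flatL (listIns L k v)) = ap1 (apN sp (flatL L)) (k, v) := by
  induction L generalizing sp with
  | nil =>
    show apN sp (flatL [(k, PySem.Dict.empty.insert v 1)]) = ap1 (apN sp (flatL [])) (k, v)
    unfold flatL gops apN
    simp [PySem.Dict.empty, PySem.Dict.insert, PySem.Dict.contains]
  | cons p rest ih =>
    obtain ⟨k2, i2⟩ := p
    simp only [List.map_cons, List.nodup_cons] at hN
    by_cases hb : (k2 == k) = true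
    · have hk2 : k2 = k := eq_of_beq hb
      subst hk2
      have hli : listIns ((k2, i2) :: rest) k2 v = (k2, i2.insert v 1) :: rest := by
        simp [listIns]
      rw [hli]
      by_cases hc : i2.contains v = true
      · rw [insert_one_of_contains i2 v (hG _ List.mem_cons_self).1 hc]
        have hmem : (k2, v) ∈ flatL ((k2, i2) :: rest) := by
          apply mem_flatL _ _ _ (k2, i2) List.mem_cons_self rfl
          rw [PySem.Dict.contains_eq_isSome_get?] at hc
          rcases Option.isSome_iff_exists.mp hc with ⟨w, hw⟩
          exact ⟨w, PySem.Dict.mem_items_of_get?_eq_some _ hw⟩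
        rw [ap1_absorb _ _ _ (Good_apN _ _ hsp) (has1_apN_of_mem _ _ _ _ hmem)]
      · have hins : (i2.insert v 1).items = i2.items ++ [(v, 1)] :=
          PySem.Dict.items_insert_of_not_contains _ _ (eq_false_of_ne_true hc)
        have hg1 : gops (k2, i2.insert v 1) = gops (k2, i2) ++ [(k2, v)] := by
          simp [gops, hins]
        rw [flatL_cons, flatL_cons, hg1, List.append_assoc, apN_append, apN_append, apN_append]
        show apN (apN (apN sp (gops (k2, i2))) [(k2, v)]) (flatL rest)
            = ap1 (apN (apN sp (gops (k2, i2))) (flatL rest)) (k2, v)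
        have hcont : (apN sp (gops (k2, i2))).contains k2 = true := by
          rcases hq : i2.items with _ | ⟨q, qs⟩
          · exact absurd hq (hG _ List.mem_cons_self).2
          · exact contains_apN_of_mem _ _ _ q.1 (by simp [gops, hq])
        have hrest : ∀ o ∈ flatL rest, o.1 ≠ k2 := by
          intro o ho hoe
          exact hN.1 (hoe ▸ flatL_fst rest o ho)
        exact apN_comm (flatL rest) _ k2 v hcont hrest
    · have hb' : (k2 == k) = false := eq_false_of_ne_true hb
      have hli : listIns ((k2, i2) :: rest) k v = (k2, i2) :: listIns rest k v := by
        simp [listIns, hb']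
      rw [hli, flatL_cons, flatL_cons, apN_append, apN_append]
      exact ih (apN sp (gops (k2, i2))) (Good_apN _ _ hsp) hN.2
        (fun p hp => hG p (List.mem_cons_of_mem _ hp))

theorem step_key (a sp : SpD) (o : String × String) (hsp : Good sp) (ha : GoodA a) :
    apN sp (flatL (ap1 a o).items) = ap1 (apN sp (flatL a.items)) o := by
  obtain ⟨L⟩ := a
  rw [items_ap1 L o.1 o.2 ha.1.1]
  exact apN_listIns L o.1 o.2 sp hsp ha.1.1
    (fun p hp => ⟨ha.1.2 p hp, ha.2 p hp⟩)

theorem step_G (ops : List (String × String)) (a sp : SpD) (hsp : Good sp) (ha : GoodA a) :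
    apN sp (flatL (apN a ops).items) = apN (apN sp (flatL a.items)) ops := by
  induction ops generalizing a with
  | nil => rfl
  | cons o rest ih =>
    show apN sp (flatL (apN (ap1 a o) rest).items) = apN (ap1 (apN sp (flatL a.items)) o) rest
    rw [ih (ap1 a o) (GoodA_ap1 a o ha), step_key a sp o hsp ha]

theorem merge_eq_apN (L : List (String × InnerD)) (sp : SpD)
    (hG : ∀ p ∈ L, p.2.items ≠ []) :
    L.foldl
        (fun sp pr =>
          pr.2.items.foldl (fun sp q => sp.modify pr.1 PySem.Dict.empty (fun m => m.insert q.1 1))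
            (if sp.contains pr.1 then sp else sp.insert pr.1 PySem.Dict.empty))
        sp = apN sp (flatL L) := by
  induction L generalizing sp with
  | nil => rfl
  | cons pr rest ih =>
    rw [flatL_cons, apN_append, List.foldl_cons, ih _ (fun p hp => hG p (List.mem_cons_of_mem _ hp))]
    congr 1
    rcases hpr : pr.2.items with _ | ⟨q, qs⟩
    · exact absurd hpr (hG pr List.mem_cons_self)
    · simp only [hpr, List.foldl_cons, modify_eq_ap1, gops, List.map_cons]
      rw [ap1_ensure]
      show _ = apN (ap1 sp (pr.1, q.1)) (qs.map (fun q => (pr.1, q.1)))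
      unfold apN
      rw [List.foldl_map]

theorem adjStep_eq (arr : List String) (d : SpD) (i : Nat) (h2 : 2 ≤ arr.length)
    (hi : i < arr.length) : adjacencyStep arr d i = apN d (opsAt arr i) := by
  unfold adjacencyStep opsAt
  by_cases h0 : i = 0
  · subst h0
    rw [if_pos rfl, if_pos (by omega : 0 + 1 < arr.length), if_neg (lt_irrefl 0)]
    rw [modify_eq_ap1, ap1_ensure]
    rfl
  · by_cases hl : i = arr.length - 1
    · rw [if_neg h0, if_pos hl, if_neg (by omega : ¬ i + 1 < arr.length),
        if_pos (by omega : 0 < i)]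
      rw [modify_eq_ap1, ap1_ensure]
      rfl
    · rw [if_neg h0, if_neg hl, if_pos (by omega : i + 1 < arr.length),
        if_pos (by omega : 0 < i)]
      rw [modify_eq_ap1, modify_eq_ap1, ap1_ensure]
      rfl

theorem adjacency_eq_apN (arr : List String) :
    get_domain_adjacency_dict arr = apN PySem.Dict.empty (opsOf arr) := by
  unfold get_domain_adjacency_dict
  by_cases h : arr.length < 2
  · rw [if_pos h]
    rcases arr with _ | ⟨x, _ | ⟨y, tl⟩⟩
    · rfl
    · simp [opsOf, opsAt, apN]
    · simp at h
  · rw [if_neg h]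
    unfold opsOf apN
    rw [List.foldl_flatMap]
    apply PySem.List.foldl_congr_mem
    intro d i hi
    exact adjStep_eq arr d i (by omega) (List.mem_range.mp hi)

theorem mergeSeqStep_eq_apN (sp : SpD) (seq : String × List String) (h : Good sp) :
    mergeSeqStep sp seq = apN sp (opsOf seq.2) := by
  unfold mergeSeqStep
  rw [merge_eq_apN _ sp (fun p hp => (((GoodA_apN _ _ GoodA_empty).2 p
    ((adjacency_eq_apN seq.2) ▸ hp))))]
  rw [adjacency_eq_apN]
  have := step_G (opsOf seq.2) PySem.Dict.empty sp h GoodA_empty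
  simpa [flatL, PySem.Dict.empty] using this

-- ----- the edge stream of B equals the op stream of A, as lists -----

theorem opsAt_succ (a : String) (rest : List String) (i : Nat) :
    opsAt (a :: rest) (i + 1) = prevTerm a rest i := by
  rcases i with _ | j <;> simp [opsAt, prevTerm] <;> (try (split_ifs <;> first | rfl | omega))

theorem prevTerm_succ (p c : String) (l : List String) (i : Nat) :
    prevTerm p (c :: l) (i + 1) = prevTerm c l i := by
  rcases i with _ | j <;> simp [prevTerm] <;> (try (split_ifs <;> first | rfl | omega))

theorem shiftOps (a : String) (rest : List String) :
    (List.range rest.length).flatMap (fun i => opsAt (a :: rest) (i + 1)) = prevOps a rest := by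
  unfold prevOps
  simp only [opsAt_succ]

theorem prevOps_nil (p : String) : prevOps p [] = [] := by simp [prevOps]

theorem prevOps_cons (p c : String) (l : List String) :
    prevOps p (c :: l) = prevTerm p (c :: l) 0 ++ prevOps c l := by
  unfold prevOps
  rw [List.length_cons, List.range_succ_eq_map, List.flatMap_cons, List.flatMap_map]
  simp only [prevTerm_succ]

theorem edgeWalk_eq (l : List String) (c p : String) :
    edgeWalk (some p) c l = prevOps p (c :: l) := by
  induction l generalizing c p with
  | nil =>
    rw [prevOps_cons, prevOps_nil]
    simp [edgeWalk, prevTerm]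
  | cons nxt l' ih =>
    rw [prevOps_cons]
    simp only [edgeWalk]
    rw [ih]
    simp [prevTerm]

theorem edges_eq_ops (arr : List String) : edgesOf arr = opsOf arr := by
  rcases arr with _ | ⟨a, _ | ⟨b, l⟩⟩
  · simp [edgesOf, opsOf]
  · simp [edgesOf, edgeWalk, opsOf, opsAt]
  · show edgeWalk none a (b :: l) = opsOf (a :: b :: l)
    unfold opsOf
    rw [List.length_cons, List.range_succ_eq_map, List.flatMap_cons, List.flatMap_map]
    have hsh : (List.range (b :: l).length).flatMap (fun i => opsAt (a :: b :: l) (i + 1))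
        = prevOps a (b :: l) := shiftOps a (b :: l)
    rw [hsh]
    simp [edgeWalk, edgeWalk_eq, opsAt]

-- ----- B's per-species fold in apN form -----

theorem bStep_eq_ap1 (sp : SpD) (e : String × String) : bStep sp e = ap1 sp e := by
  unfold bStep
  rw [setdefault_eq_ensure, modify_eq_ap1]
  exact ap1_ensure sp e.1 e.2

theorem bfold_eq (seqs : List (String × List String)) :
    (seqs.flatMap (fun s => edgesOf s.2)).foldl bStep PySem.Dict.empty
      = apN PySem.Dict.empty (seqs.flatMap (fun s => opsOf s.2)) := by
  have hf : bStep = ap1 := funext fun sp => funext fun e => bStep_eq_ap1 sp e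
  simp only [edges_eq_ops, hf]
  rfl

theorem afold_eq (seqs : List (String × List String)) (sp : SpD) (h : Good sp) :
    seqs.foldl mergeSeqStep sp = apN sp (seqs.flatMap (fun s => opsOf s.2)) := by
  induction seqs generalizing sp with
  | nil => rfl
  | cons s rest ih =>
    rw [List.foldl_cons, mergeSeqStep_eq_apN sp s h, List.flatMap_cons, apN_append]
    exact ih _ (Good_apN _ _ h)

-- ===== VERDICT (by name: the statement is the Claim_ definition above) =====
theorem get_species_domvrstlty_dict_spec : Claim_equal_get_species_domvrstlty_dict := by
  intro input _
  unfold Spec_get_species_domvrstlty_dict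
  unfold get_species_domvrstlty_dict get_species_domvrstlty_dict_alt
  congr 1
  congr 1
  apply PySem.List.foldl_congr_mem
  intro out sp_seqs _
  rw [afold_eq _ _ Good_empty, bfold_eq]
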